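-- pv_equiv track=rewrite | github.com/wingsof/trader | clients/scalping_by_amount/price_info.py | upper_available_empty_slots
-- ===== SOURCE A (Python) =====
-- CURRENT_MARK = 3
--
-- VI_MARK = 4
--
-- def upper_available_empty_slots(slots):
--     available_slots = []
--     start_count = False
--
--     for i in range(len(slots[0])):
--         if start_count:
--             if slots[1][i] == VI_MARK:
--                 break
--             available_slots.append(slots[0][i])
--         else:
--             if slots[1][i] == CURRENT_MARK:
--                 start_count = True
--     return available_slots
-- ===== SOURCE B (Python) =====
-- CURRENT_MARK = 3
--
-- VI_MARK = 4
--
--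
-- def upper_available_empty_slots(slots):
--     # locate the CURRENT_MARK boundary, then the VI_MARK boundary, then slice
--     n = len(slots[0])
--     c = None
--     for i in range(n):
--         if slots[1][i] == CURRENT_MARK:
--             c = i
--             break
--     if c is None:
--         return []
--     start = c + 1
--     for i in range(start, n):
--         if slots[1][i] == VI_MARK:
--             return slots[0][start:i]
--     return slots[0][start:]
-- ===== Notes on version B (the rewrite author's own statement) =====
-- stated objective: alternative
-- what changed: Replaces A's single boolean-flag accumulate-as-you-go loop with locate-the-two-mark-boundaries-then-slice: find the first CURRENT_MARK index, then the first VI_MARK index after it, and return the slice of slots[0] between them.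
import Mathlib
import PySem

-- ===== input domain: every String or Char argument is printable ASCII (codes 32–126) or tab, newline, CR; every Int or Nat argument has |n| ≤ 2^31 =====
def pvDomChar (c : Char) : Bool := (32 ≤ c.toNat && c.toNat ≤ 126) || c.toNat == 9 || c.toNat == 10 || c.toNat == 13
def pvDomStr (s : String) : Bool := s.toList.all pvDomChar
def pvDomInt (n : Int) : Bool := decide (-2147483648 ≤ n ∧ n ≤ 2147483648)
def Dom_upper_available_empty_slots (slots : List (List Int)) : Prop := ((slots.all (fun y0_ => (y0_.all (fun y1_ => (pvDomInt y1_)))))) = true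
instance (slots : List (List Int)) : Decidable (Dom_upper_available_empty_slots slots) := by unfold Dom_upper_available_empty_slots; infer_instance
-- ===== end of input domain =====

-- B replaces A's boolean-flag accumulation loop with locate-both-boundaries-then-slice (alternative decomposition, same cost).

-- ===== PORT A =====
-- the flag/accumulator loop over i in range(len(slots[0]))
def aLoop (s0 s1 : List Int) : List Nat → List Int → Bool → List Int
  | [], acc, _ => acc
  | i :: rest, acc, sc =>
    if sc then
      if PySem.List.pyGetD s1 (i : Int) 0 = 4 then acc
      else aLoop s0 s1 rest (acc ++ [PySem.List.pyGetD s0 (i : Int) 0]) sc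
    else
      if PySem.List.pyGetD s1 (i : Int) 0 = 3 then aLoop s0 s1 rest acc true
      else aLoop s0 s1 rest acc false

def upper_available_empty_slots (slots : List (List Int)) : List Int :=
  aLoop (PySem.List.pyGetD slots 0 []) (PySem.List.pyGetD slots 1 [])
    (List.range (PySem.List.pyGetD slots 0 []).length) [] false

-- ===== PORT B =====
-- first index with slots[1][i] == CURRENT_MARK (first loop of Source B)
def bFindC (s1 : List Int) : List Nat → Option Nat
  | [] => none
  | i :: rest => if PySem.List.pyGetD s1 (i : Int) 0 = 3 then some i else bFindC s1 rest

-- first index with slots[1][i] == VI_MARK (second loop of Source B)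
def bFindV (s1 : List Int) : List Nat → Option Nat
  | [] => none
  | i :: rest => if PySem.List.pyGetD s1 (i : Int) 0 = 4 then some i else bFindV s1 rest

def upper_available_empty_slots_alt (slots : List (List Int)) : List Int :=
  let s0 := PySem.List.pyGetD slots 0 []
  let s1 := PySem.List.pyGetD slots 1 []
  let n := s0.length
  match bFindC s1 (List.range n) with
  | none => []
  | some c =>
    let start := c + 1
    match bFindV s1 (List.range' start (n - start)) with
    | some v => PySem.List.slice s0 (some (start : Int)) (some (v : Int))
    | none => PySem.List.slice s0 (some (start : Int)) none

-- ===== PRECONDITION & SPEC =====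
-- Pre_ excludes exactly the inputs where the Python raises IndexError: slots empty, or slots[0]
-- nonempty while slots[1] is missing, or slots[1] too short to cover every index the loop reaches
-- (all of slots[0]'s indices, unless a CURRENT_MARK followed by a VI_MARK stops the loop early).
def Pre_upper_available_empty_slots (slots : List (List Int)) : Prop :=
  slots ≠ [] ∧
    (slots.headD [] = [] ∨ (2 ≤ slots.length ∧
      ((slots.headD []).length ≤ (slots.getD 1 []).length ∨
        ∃ c < (slots.getD 1 []).length, ∃ v < (slots.getD 1 []).length,
          c < v ∧ v < (slots.headD []).length ∧
          (slots.getD 1 []).getD c 0 = 3 ∧ (slots.getD 1 []).getD v 0 = 4 ∧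
          (∀ j < c, (slots.getD 1 []).getD j 0 ≠ 3) ∧
          (∀ j < v, c < j → (slots.getD 1 []).getD j 0 ≠ 4))))
instance (slots : List (List Int)) : Decidable (Pre_upper_available_empty_slots slots) := by
  unfold Pre_upper_available_empty_slots; infer_instance

def pvWitness_upper_available_empty_slots : List (List Int) := [[1, 2], [3, 4]]

def Spec_upper_available_empty_slots (slots : List (List Int)) (out : List Int) : Prop := out = upper_available_empty_slots_alt slots
instance (slots : List (List Int)) (out : List Int) : Decidable (Spec_upper_available_empty_slots slots out) := by unfold Spec_upper_available_empty_slots; infer_instance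

-- ===== CLAIM (what is proved, stated in full; the proofs are below) =====
def Claim_equal_upper_available_empty_slots : Prop := ∀ (slots : List (List Int)), Dom_upper_available_empty_slots slots → Pre_upper_available_empty_slots slots → Spec_upper_available_empty_slots slots (upper_available_empty_slots slots)

-- ===== LEMMAS AND PROOFS =====

lemma bFindC_mem (s1 : List Int) (l : List Nat) (v : Nat) (h : bFindC s1 l = some v) : v ∈ l := by
  induction l with
  | nil => simp [bFindC] at h
  | cons i rest ih =>
    simp only [bFindC] at h
    split at h
    · simp_all
    · exact List.mem_cons_of_mem _ (ih h)

lemma bFindV_mem (s1 : List Int) (l : List Nat) (v : Nat) (h : bFindV s1 l = some v) : v ∈ l := by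
  induction l with
  | nil => simp [bFindV] at h
  | cons i rest ih =>
    simp only [bFindV] at h
    split at h
    · simp_all
    · exact List.mem_cons_of_mem _ (ih h)

-- scanning phase: until CURRENT_MARK is found the loop only moves the flag
lemma aLoop_false (s0 s1 : List Int) : ∀ (m a : Nat) (acc : List Int),
    aLoop s0 s1 (List.range' a m) acc false =
      match bFindC s1 (List.range' a m) with
      | none => acc
      | some c => aLoop s0 s1 (List.range' (c + 1) (a + m - (c + 1))) acc true := by
  intro m
  induction m with
  | zero => intro a acc; simp [aLoop, bFindC]
  | succ m ih =>
    intro a acc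
    rw [List.range'_succ]
    by_cases h : PySem.List.pyGetD s1 (a : Int) 0 = 3
    · have harith : a + (m + 1) - (a + 1) = m := by omega
      simp [aLoop, bFindC, h, harith]
    · have harith : a + 1 + m = a + (m + 1) := by omega
      simp only [aLoop, bFindC, h, Bool.false_eq_true, if_false]
      rw [ih (a + 1) acc, harith]

-- collecting phase: after the flag is set the loop appends slots[0][i] until VI_MARK
lemma aLoop_true (s0 s1 : List Int) : ∀ (m a : Nat), a + m ≤ s0.length → ∀ (acc : List Int),
    aLoop s0 s1 (List.range' a m) acc true =
      acc ++ (match bFindV s1 (List.range' a m) with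
              | none => (s0.drop a).take m
              | some v => (s0.drop a).take (v - a)) := by
  intro m
  induction m with
  | zero => intro a _ acc; simp [aLoop, bFindV]
  | succ m ih =>
    intro a hlen acc
    have ha : a < s0.length := by omega
    rw [List.range'_succ]
    by_cases h : PySem.List.pyGetD s1 (a : Int) 0 = 4
    · simp [aLoop, h, bFindV]
    · have hget : PySem.List.pyGetD s0 (a : Int) 0 = s0[a] := by
        simp [PySem.List.pyGetD_natCast, List.getD_eq_getElem?_getD, List.getElem?_eq_getElem ha]
      have hdrop : s0.drop a = s0[a] :: s0.drop (a + 1) := List.drop_eq_getElem_cons ha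
      simp only [aLoop, bFindV, if_neg h, reduceIte]
      rw [ih (a + 1) (by omega) (acc ++ [PySem.List.pyGetD s0 (a : Int) 0])]
      cases hV : bFindV s1 (List.range' (a + 1) m) with
      | none =>
        dsimp only
        rw [hget, hdrop, List.take_succ_cons, List.append_assoc, List.singleton_append]
      | some v =>
        have hv : a + 1 ≤ v := (List.mem_range'_1.mp (bFindV_mem s1 _ v hV)).1
        have harith : v - a = (v - (a + 1)) + 1 := by omega
        dsimp only
        rw [hget, hdrop, harith, List.take_succ_cons, List.append_assoc, List.singleton_append]

-- ===== VERDICT (by name: the statement is the Claim_ definition above) =====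
theorem upper_available_empty_slots_spec : Claim_equal_upper_available_empty_slots := by
  intro slots _ _
  unfold Spec_upper_available_empty_slots upper_available_empty_slots upper_available_empty_slots_alt
  simp only [List.range_eq_range']
  rw [aLoop_false]
  cases hC : bFindC (PySem.List.pyGetD slots 1 [])
      (List.range' 0 (PySem.List.pyGetD slots 0 []).length) with
  | none => simp
  | some c =>
    have hc : c < (PySem.List.pyGetD slots 0 []).length := by
      have := List.mem_range'_1.mp (bFindC_mem _ _ c hC)
      omega
    simp only [Nat.zero_add]
    rw [aLoop_true _ _ ((PySem.List.pyGetD slots 0 []).length - (c + 1)) (c + 1) (by omega) []]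
    cases hV : bFindV (PySem.List.pyGetD slots 1 [])
        (List.range' (c + 1) ((PySem.List.pyGetD slots 0 []).length - (c + 1))) with
    | none =>
      dsimp only
      rw [PySem.List.slice_from_natCast, List.nil_append]
      have h2 : (PySem.List.pyGetD slots 0 []).length - (c + 1)
          = ((PySem.List.pyGetD slots 0 []).drop (c + 1)).length := by simp
      rw [h2, List.take_length]
    | some v =>
      dsimp only
      rw [PySem.List.slice_natCast, List.nil_append]
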